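-- pv_equiv track=rewrite | github.com/steveya/trellis | trellis/agent/knowledge/import_registry.py | _build_symbol_index
-- ===== SOURCE A (Python) =====
-- from collections import defaultdict
--
-- def _build_symbol_index(registry: dict[str, tuple[str, ...]]) -> dict[str, tuple[str, ...]]:
--     """Invert the registry into symbol -> module candidates."""
--     index: dict[str, list[str]] = defaultdict(list)
--     for module_path, exports in registry.items():
--         for exported in exports:
--             index[exported].append(module_path)
--     return {
--         name: tuple(sorted(paths))
--         for name, paths in index.items()
--     }
-- ===== SOURCE B (Python) =====
-- def _insert_sorted(path, bucket):
--     """Return bucket (ascending) with path inserted, keeping ascending order."""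
--     if not bucket:
--         return [path]
--     if path < bucket[0]:
--         return [path] + bucket
--     return [bucket[0]] + _insert_sorted(path, bucket[1:])
--
--
-- def _build_symbol_index(registry: dict[str, tuple[str, ...]]) -> dict[str, tuple[str, ...]]:
--     """Invert the registry into symbol -> module candidates (buckets kept sorted incrementally)."""
--     index: dict[str, list[str]] = {}
--     for module_path, exports in registry.items():
--         for exported in exports:
--             index[exported] = _insert_sorted(module_path, index.get(exported, []))
--     return {name: tuple(paths) for name, paths in index.items()}
-- ===== Notes on version B (the rewrite author's own statement) =====
-- stated objective: alternative
-- what changed: Instead of appending modules to each bucket and batch-sorting every bucket at the end, B maintains each symbol's bucket as an always-sorted list by inserting every module at its ordered position, so the final pass is just tuple conversion.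
import Mathlib
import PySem

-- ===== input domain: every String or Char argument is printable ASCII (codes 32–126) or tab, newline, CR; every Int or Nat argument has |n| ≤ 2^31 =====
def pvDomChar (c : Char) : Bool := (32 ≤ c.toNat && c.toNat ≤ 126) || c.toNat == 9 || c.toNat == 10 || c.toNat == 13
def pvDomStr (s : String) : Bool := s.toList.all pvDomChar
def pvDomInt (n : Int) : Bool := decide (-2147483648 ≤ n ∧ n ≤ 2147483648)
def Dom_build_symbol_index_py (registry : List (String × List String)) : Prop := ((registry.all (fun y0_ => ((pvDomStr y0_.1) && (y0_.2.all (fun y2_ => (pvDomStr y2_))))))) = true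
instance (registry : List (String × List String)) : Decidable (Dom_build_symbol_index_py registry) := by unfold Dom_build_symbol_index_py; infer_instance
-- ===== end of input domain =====

-- B keeps every symbol's bucket always-sorted by ordered insertion instead of appending and batch-sorting each bucket at the end; same result, alternative decomposition.


-- ===== PORT A =====
-- index = defaultdict(list); for module_path, exports: for exported: index[exported].append(module_path);
-- return {name: tuple(sorted(paths)) for name, paths in index.items()}
def build_symbol_index_py (registry : List (String × List String)) : List (String × List String) :=
  let index : PySem.Dict String (List String) :=
    (PySem.Dict.ofList registry).items.foldl
      (fun d mp_exports =>
        mp_exports.2.foldl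
          (fun d exported => d.modify exported [] (fun paths => paths ++ [mp_exports.1])) d)
      PySem.Dict.empty
  index.items.map (fun p => (p.1, PySem.List.sorted p.2 (fun x => x)))

-- ===== PORT B =====
-- _insert_sorted(path, bucket): recursive ordered insertion
def insSortedAlt (path : String) (bucket : List String) : List String :=
  match bucket with
  | [] => [path]
  | y :: ys => if path < y then path :: y :: ys else y :: insSortedAlt path ys

-- index = {}; for module_path, exports: for exported: index[exported] = _insert_sorted(module_path, index.get(exported, []));
-- return {name: tuple(paths) for name, paths in index.items()}
def build_symbol_index_py_alt (registry : List (String × List String)) : List (String × List String) :=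
  let index : PySem.Dict String (List String) :=
    (PySem.Dict.ofList registry).items.foldl
      (fun d mp_exports =>
        mp_exports.2.foldl
          (fun d exported => d.modify exported [] (fun bucket => insSortedAlt mp_exports.1 bucket)) d)
      PySem.Dict.empty
  index.items

-- ===== PRECONDITION & SPEC =====
def Spec_build_symbol_index_py (registry : List (String × List String)) (out : List (String × List String)) : Prop := out = build_symbol_index_py_alt registry
instance (registry : List (String × List String)) (out : List (String × List String)) : Decidable (Spec_build_symbol_index_py registry out) := by unfold Spec_build_symbol_index_py; infer_instance

-- ===== CLAIM (what is proved, stated in full; the proofs are below) =====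
def Claim_equal_build_symbol_index_py : Prop := ∀ (registry : List (String × List String)), Dom_build_symbol_index_py registry → Spec_build_symbol_index_py registry (build_symbol_index_py registry)

-- ===== LEMMAS AND PROOFS =====

-- per-bucket view of A's final comprehension
def pvSortBucket (p : String × List String) : String × List String :=
  (p.1, PySem.List.sorted p.2 (fun x => x))

theorem insSortedAlt_eq_insertBy (x : String) (xs : List String) :
    insSortedAlt x xs = PySem.List.insertBy (fun a b => decide (a < b)) x xs := by
  induction xs with
  | nil => rfl
  | cons y ys ih => simp [insSortedAlt, PySem.List.insertBy, ih]

-- crux: inserting into the sorted bucket = sorting the appended bucket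
theorem sorted_append_singleton (b : List String) (m : String) :
    PySem.List.sorted (b ++ [m]) (fun x => x) =
      insSortedAlt m (PySem.List.sorted b (fun x => x)) := by
  rw [PySem.List.sorted_eq_foldl_insertBy, PySem.List.sorted_eq_foldl_insertBy,
    List.foldl_append, insSortedAlt_eq_insertBy]
  rfl

-- one modify step preserves the "B's dict = A's dict with sorted buckets" relation
theorem step_modify (d : PySem.Dict String (List String)) (e m : String) :
    ((PySem.Dict.mk (d.items.map pvSortBucket)).modify e []
        (fun bucket => insSortedAlt m bucket)).items
      = ((d.modify e [] (fun paths => paths ++ [m])).items.map pvSortBucket) := by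
  obtain ⟨l⟩ := d
  have hcomp : ((fun p : String × List String => p.1 == e) ∘ pvSortBucket)
      = (fun p : String × List String => p.1 == e) := rfl
  simp only [PySem.Dict.modify, PySem.Dict.insert, PySem.Dict.getD, PySem.Dict.get?,
    PySem.Dict.contains, List.any_map, List.find?_map, hcomp]
  by_cases h : l.any (fun p => p.1 == e)
  · simp only [h, if_true]
    rcases hf : l.find? (fun p => p.1 == e) with _ | p
    · -- contradiction with any = true
      rw [List.find?_eq_none] at hf
      rw [List.any_eq_true] at h
      obtain ⟨p, hp, hpe⟩ := h
      exact absurd hpe (by simpa using hf p hp)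
    · simp only [hf, Option.map_some, Option.getD_some, List.map_map]
      apply List.map_congr_left
      intro q _
      by_cases hqe : q.1 == e
      · simp [Function.comp, pvSortBucket, hqe, sorted_append_singleton]
      · simp [Function.comp, pvSortBucket, hqe]
  · have hfind : (l.find? fun p => p.1 == e) = none := by
      rw [List.find?_eq_none]; intro p hp
      rw [Bool.not_eq_true, List.any_eq_false] at h
      simpa using h p hp
    simp [h, hfind, pvSortBucket]
    rfl

-- the inner loop over exports preserves the relation
theorem inner_loop (exports : List String) (m : String)
    (d : PySem.Dict String (List String)) :
    (exports.foldl
        (fun d exported => d.modify exported [] (fun bucket => insSortedAlt m bucket))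
        (PySem.Dict.mk (d.items.map pvSortBucket))).items
      = ((exports.foldl
          (fun d exported => d.modify exported [] (fun paths => paths ++ [m])) d).items.map
            pvSortBucket) := by
  induction exports generalizing d with
  | nil => rfl
  | cons e rest ih =>
    simp only [List.foldl_cons]
    have hd : ((PySem.Dict.mk (d.items.map pvSortBucket)).modify e []
          (fun bucket => insSortedAlt m bucket))
        = PySem.Dict.mk (((d.modify e [] (fun paths => paths ++ [m])).items).map pvSortBucket) :=
      PySem.Dict.ext (step_modify d e m)
    rw [hd]
    exact ih _

-- the outer loop over registry items preserves the relation
theorem outer_loop (items : List (String × List String))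
    (d : PySem.Dict String (List String)) :
    (items.foldl
        (fun d mp_exports =>
          mp_exports.2.foldl
            (fun d exported => d.modify exported [] (fun bucket => insSortedAlt mp_exports.1 bucket)) d)
        (PySem.Dict.mk (d.items.map pvSortBucket))).items
      = ((items.foldl
          (fun d mp_exports =>
            mp_exports.2.foldl
              (fun d exported => d.modify exported [] (fun paths => paths ++ [mp_exports.1])) d)
          d).items.map pvSortBucket) := by
  induction items generalizing d with
  | nil => rfl
  | cons me rest ih =>
    simp only [List.foldl_cons]
    have hd : (me.2.foldl
          (fun d exported => d.modify exported [] (fun bucket => insSortedAlt me.1 bucket))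
          (PySem.Dict.mk (d.items.map pvSortBucket)))
        = PySem.Dict.mk (((me.2.foldl
            (fun d exported => d.modify exported [] (fun paths => paths ++ [me.1])) d).items).map
              pvSortBucket) :=
      PySem.Dict.ext (inner_loop me.2 me.1 d)
    rw [hd]
    exact ih _

-- ===== VERDICT (by name: the statement is the Claim_ definition above) =====
theorem build_symbol_index_py_spec : Claim_equal_build_symbol_index_py := by
  intro registry _
  unfold Spec_build_symbol_index_py build_symbol_index_py build_symbol_index_py_alt
  have h := outer_loop (PySem.Dict.ofList registry).items PySem.Dict.empty
  simpa [pvSortBucket, PySem.Dict.empty] using h.symm
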